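-- pv_equiv track=rewrite | github.com/yesyell/Algorithm-SQL | Level1/과일장수/solution.py | solution
-- ===== SOURCE A (Python) =====
-- def solution(k, m, score):
--     answer = 0
--     score_s = sorted(score, reverse=True)
--     for i in range(0, len(score), m):
--         if len(score) >= i+m:
--             k = min(score_s[i:i+m])
--             answer += k * m
--     return answer
-- ===== SOURCE B (Python) =====
-- def solution(k, m, score):
--     # Tally grades once, then walk the distinct grades in descending order,
--     # counting how many complete boxes of size m finish inside each run of
--     # equal grades: each such box's minimum is that grade.
--     if m < 1:
--         return 0
--     counts = {}
--     for s in score: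
--         counts[s] = counts.get(s, 0) + 1
--     total = 0
--     pos = 0
--     for g in sorted(counts, reverse=True):
--         c = counts[g]
--         total += g * ((pos + c) // m - pos // m) * m
--         pos += c
--     return total
-- ===== Notes on version B (the rewrite author's own statement) =====
-- stated objective: alternative
-- what changed: B replaces 'sort the whole list descending, then slice each group of m and take min()' by a single counting pass into a dict plus one walk over the distinct grades in descending order, adding grade * (number of complete boxes finishing inside that grade's run) * m via floor-division of the running position.
import Mathlib
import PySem

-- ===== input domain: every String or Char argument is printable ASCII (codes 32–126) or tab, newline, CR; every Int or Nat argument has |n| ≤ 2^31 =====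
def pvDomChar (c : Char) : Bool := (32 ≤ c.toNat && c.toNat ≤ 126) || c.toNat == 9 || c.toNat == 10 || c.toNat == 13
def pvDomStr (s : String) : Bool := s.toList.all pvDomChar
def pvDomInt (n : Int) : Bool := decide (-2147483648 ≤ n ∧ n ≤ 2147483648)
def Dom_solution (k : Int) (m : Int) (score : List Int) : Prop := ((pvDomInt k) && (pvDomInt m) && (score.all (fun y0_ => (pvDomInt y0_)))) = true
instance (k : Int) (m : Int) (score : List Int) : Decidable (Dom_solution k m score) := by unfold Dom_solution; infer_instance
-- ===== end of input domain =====

-- B tallies the grades into a counter and walks the distinct grades in descending order,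
-- counting complete boxes by floor division of the running position — one different pass
-- structure instead of sort + slice + min (objective: alternative).

-- ===== PORT A =====
-- the '.getD 0' on min? is never taken: under Pre_ (m ≠ 0) the guarded slice is nonempty,
-- exactly where Python's min() returns.
def solution (k : Int) (m : Int) (score : List Int) : Int :=
  let score_s := PySem.List.sorted score (fun x => x) true
  ((PySem.List.pyRange 0 (PySem.List.len score) m).foldl
      (fun (st : Int × Int) i =>
        if PySem.List.len score ≥ i + m then
          let kk := (PySem.List.min? (PySem.List.slice score_s (some i) (some (i + m))) (fun x => x)).getD 0
          (st.1 + kk * m, kk)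
        else st)
      (0, k)).1

-- ===== PORT B =====
def solution_alt (k : Int) (m : Int) (score : List Int) : Int :=
  if m < 1 then 0
  else
    let counts := PySem.Dict.counter score
    ((PySem.List.sorted counts.keys (fun x => x) true).foldl
        (fun (st : Int × Int) g =>
          let c := counts.getD g 0
          (st.1 + g * (PySem.Int.floordiv (st.2 + c) m - PySem.Int.floordiv st.2 m) * m, st.2 + c))
        (0, 0)).1

-- ===== PRECONDITION & SPEC =====
-- Pre_ excludes exactly m = 0, where Python A raises ValueError (range() arg 3 must not be zero).
def Pre_solution (k : Int) (m : Int) (score : List Int) : Prop := m ≠ 0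
instance (k : Int) (m : Int) (score : List Int) : Decidable (Pre_solution k m score) := by unfold Pre_solution; infer_instance
def pvWitness_solution : Int × Int × List Int := (0, 2, [3, 1, 2, 3])

def Spec_solution (k : Int) (m : Int) (score : List Int) (out : Int) : Prop := out = solution_alt k m score
instance (k : Int) (m : Int) (score : List Int) (out : Int) : Decidable (Spec_solution k m score out) := by unfold Spec_solution; infer_instance

-- ===== CLAIM (what is proved, stated in full; the proofs are below) =====
def Claim_equal_solution : Prop := ∀ (k : Int) (m : Int) (score : List Int), Dom_solution k m score → Pre_solution k m score → Spec_solution k m score (solution k m score)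

-- ===== LEMMAS AND PROOFS =====

-- the common value both programs compute: sum of the (j*w + w - 1)-th elements of the
-- descending-sorted list over the complete groups j < q (m = w)
def sumMins (s : List Int) (w q : Nat) : Int :=
  ((List.range q).map (fun j => s.getD (j * w + w - 1) 0)).sum

-- the grade runs laid end to end
def flatRuns (ks : List Int) (cnt : Int → Nat) : List Int :=
  ks.flatMap (fun g => List.replicate (cnt g) g)

theorem pairFold (l : List Nat) (p : Nat → Prop) [DecidablePred p] (f g : Nat → Int) (a b : Int) :
    (l.foldl (fun (st : Int × Int) j => if p j then (st.1 + f j, g j) else st) (a, b)).1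
      = a + ((l.filter (fun j => decide (p j))).map f).sum := by
  induction l generalizing a b with
  | nil => simp
  | cons x xs ih =>
    simp only [List.foldl_cons, List.filter_cons]
    by_cases hx : p x
    · simp [hx, ih, add_assoc]
    · simp [hx, ih]

theorem filter_range_lt (K q : Nat) (h : q ≤ K) :
    (List.range K).filter (fun j => decide (j < q)) = List.range q := by
  have : K = q + (K - q) := by omega
  rw [this, List.range_add, List.filter_append]
  rw [List.filter_eq_self.2 (by intro a ha; simp [List.mem_range] at ha ⊢; omega),
      List.filter_eq_nil_iff.2 (by intro a ha; simp [List.mem_range] at ha ⊢; obtain ⟨b, _, rfl⟩ := ha; omega)]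
  simp

theorem min_window (s : List Int) (hs : s.Pairwise (fun a b => b ≤ a)) (p w : Nat)
    (hw : 1 ≤ w) (hpw : p + w ≤ s.length) :
    PySem.List.min? (List.take w (List.drop p s)) (fun x => x) = some (s.getD (p + w - 1) 0) := by
  set t := List.take w (List.drop p s) with ht
  have hlt : t.length = w := by
    simp [ht]; omega
  have htne : t ≠ [] := by intro h; rw [h] at hlt; simp at hlt; omega
  obtain ⟨v, hv⟩ : ∃ v, PySem.List.min? t (fun x => x) = some v := by
    cases h : PySem.List.min? t (fun x => x) with
    | none => exact absurd ((PySem.List.min?_eq_none_iff t _).1 h) htne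
    | some v => exact ⟨v, rfl⟩
  rw [hv]
  have hgetT : ∀ i (hi : i < w), t[i]'(by omega) = s[p + i]'(by omega) := by
    intro i hi
    simp [ht, List.getElem_take, List.getElem_drop]
  have hlast : s.getD (p + w - 1) 0 = t[w-1]'(by omega) := by
    rw [hgetT (w-1) (by omega)]
    rw [List.getD_eq_getElem _ _ (by omega)]
    congr 1; omega
  have hdesc := List.pairwise_iff_getElem.1 hs
  -- v ∈ t, and min
  have hvmem := PySem.List.min?_mem hv
  obtain ⟨i, hi, hvi⟩ := List.mem_iff_getElem.1 hvmem
  have hvmin := PySem.List.min?_isMin hv (t[w-1]'(by omega)) (List.getElem_mem _)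
  have hge : t[w-1]'(by omega) ≤ v := by
    rw [← hvi]
    rw [hgetT i (by omega), hgetT (w-1) (by omega)]
    rcases Nat.lt_or_ge i (w-1) with h | h
    · exact hdesc (p+i) (p+(w-1)) (by omega) (by omega) (by omega)
    · have : i = w - 1 := by omega
      subst this; exact le_refl _
  rw [hlast]
  exact congrArg some (le_antisymm hvmin hge)

theorem A_char (k : Int) (score : List Int) (w : Nat) (hw : 1 ≤ w) :
    solution k (w : Int) score
      = sumMins (PySem.List.sorted score (fun x => x) true) w (score.length / w) * w := by
  unfold solution
  dsimp only
  set s := PySem.List.sorted score (fun x => x) true with hsdef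
  have hslen : s.length = score.length := (PySem.List.sorted_perm score (fun x => x) true).length_eq
  set n := score.length with hn
  set q := n / w with hq
  rw [PySem.List.pyRange_of_pos 0 (PySem.List.len score) (by exact_mod_cast hw)]
  set K := (if (0:Int) < PySem.List.len score then ((PySem.List.len score - 0 + ↑w - 1) / ↑w).toNat else 0) with hK
  rw [List.foldl_map]
  have hqK : q ≤ K := by
    rw [hK]
    by_cases h0 : 0 < n
    · rw [if_pos (by simp [PySem.List.len_eq]; omega)]
      have : (PySem.List.len score - 0 + (w:Int) - 1) = ((n + w - 1 : Nat) : Int) := by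
        simp [PySem.List.len_eq]; push_cast; omega
      rw [this]
      rw [show ((n + w - 1 : Nat) : Int) / (w : Int) = (((n + w - 1) / w : Nat) : Int) from (Int.natCast_div _ _).symm]
      simp only [Int.toNat_natCast]
      exact Nat.div_le_div_right (by omega)
    · have : n = 0 := by omega
      simp [hq, this]
  have := pairFold (List.range K)
      (fun j => PySem.List.len score ≥ (0 + (w:Int) * (j:Int)) + (w:Int))
      (fun j => (PySem.List.min? (PySem.List.slice s (some (0 + (w:Int) * (j:Int))) (some ((0 + (w:Int) * (j:Int)) + (w:Int)))) (fun x => x)).getD 0 * (w:Int))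
      (fun j => (PySem.List.min? (PySem.List.slice s (some (0 + (w:Int) * (j:Int))) (some ((0 + (w:Int) * (j:Int)) + (w:Int)))) (fun x => x)).getD 0)
      0 k
  rw [this]
  clear this
  have hfilt : (List.range K).filter (fun (j : Nat) => decide (PySem.List.len score ≥ (0 + (w:Int) * (j:Int)) + (w:Int))) = List.range q := by
    have hcongr : (List.range K).filter (fun (j : Nat) => decide (PySem.List.len score ≥ (0 + (w:Int) * (j:Int)) + (w:Int)))
        = (List.range K).filter (fun (j : Nat) => decide (j < q)) := by
      apply List.filter_congr
      intro j _
      simp only [decide_eq_decide, PySem.List.len_eq, ge_iff_le, ← hn]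
      rw [show (0:Int) + (w:Int)*(j:Int) + (w:Int) = ((w*j + w : Nat):Int) from by push_cast; ring, Nat.cast_le]
      constructor
      · intro h
        have h2c : (j+1) * w ≤ n := by calc (j+1)*w = w*j + w := by ring
                                            _ ≤ n := h
        have h3 : j + 1 ≤ n / w := (Nat.le_div_iff_mul_le (by omega)).2 h2c
        omega
      · intro h
        have h2 : (j + 1) * w ≤ (n / w) * w := Nat.mul_le_mul_right w (by omega)
        have h3 : (n / w) * w ≤ n := Nat.div_mul_le_self n w
        calc w*j + w = (j+1)*w := by ring
          _ ≤ (n/w)*w := h2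
          _ ≤ n := h3
    rw [hcongr]
    exact filter_range_lt K q hqK
  rw [hfilt]
  rw [zero_add, sumMins, ← List.sum_map_mul_right]
  apply congrArg
  apply List.map_congr_left
  intro j hj
  simp only [List.mem_range] at hj
  have hbound : w * j + w ≤ n := by
    have h2 : (j + 1) * w ≤ (n / w) * w := Nat.mul_le_mul_right w (by omega)
    have h3 : (n / w) * w ≤ n := Nat.div_mul_le_self n w
    calc w*j + w = (j+1)*w := by ring
      _ ≤ (n/w)*w := h2
      _ ≤ n := h3
  have hcast : (0 + (w:Int) * (j:Int)) = ((w * j : Nat) : Int) := by push_cast; ring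
  rw [hcast, show ((w*j : Nat):Int) + (w:Int) = ((w*j:Nat):Int) + ((w:Nat):Int) from rfl]
  rw [PySem.List.slice_natCast_add s (w*j) w]
  rw [min_window s (by simpa [hsdef] using PySem.List.sorted_pairwise_rev score (fun x => x)) (w*j) w hw (by omega)]
  simp only [Option.getD_some]
  congr 2
  rw [Nat.mul_comm]

theorem div_bounds (p w : Nat) (hw : 1 ≤ w) : (p/w)*w ≤ p ∧ p < (p/w)*w + w := by
  have h1 := Nat.div_add_mod p w
  have h2 := Nat.mod_lt p (show 0 < w by omega)
  have h3 : w * (p/w) = (p/w) * w := Nat.mul_comm _ _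
  omega

theorem window_bounds (w p c j : Nat) (hw : 1 ≤ w) (hj : j < (p+c)/w - p/w) :
    p < (p/w + 1 + j)*w ∧ (p/w + 1 + j)*w ≤ p + c := by
  have h1 := div_bounds p w hw
  have h2 := (div_bounds (p+c) w hw).1
  have hmono : (p/w + 1 + j)*w ≤ ((p+c)/w)*w := Nat.mul_le_mul_right w (by omega)
  have hexp : (p/w + 1 + j)*w = (p/w)*w + w + j*w := by ring
  omega

theorem blockSum (w : Nat) (hw : 1 ≤ w) (cnt : Int → Nat) (ks : List Int) (t : Int) (p : Nat) :
    (ks.foldl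
        (fun (st : Int × Int) g =>
          (st.1 + g * (PySem.Int.floordiv (st.2 + (cnt g : Int)) (w : Int)
                        - PySem.Int.floordiv st.2 (w : Int)) * (w : Int), st.2 + (cnt g : Int)))
        (t, (p : Int))).1
      = t + ((List.range ((p + (flatRuns ks cnt).length) / w - p / w)).map
              (fun j => (flatRuns ks cnt).getD ((p / w + 1 + j) * w - 1 - p) 0)).sum * (w : Int) := by
  induction ks generalizing t p with
  | nil => simp [flatRuns]
  | cons g ks ih =>
    simp only [List.foldl_cons]
    have hcast : ((p:Int) + (cnt g : Int)) = ((p + cnt g : Nat) : Int) := by push_cast; ring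
    rw [hcast, PySem.Int.floordiv_natCast, PySem.Int.floordiv_natCast]
    rw [ih (t + ↑g * (↑((p + cnt g) / w) - ↑(p / w)) * ↑w) (p + cnt g)]
    have hab : p / w ≤ (p + cnt g) / w := Nat.div_le_div_right (by omega)
    have hbe : (p + cnt g) / w ≤ (p + cnt g + (flatRuns ks cnt).length) / w := Nat.div_le_div_right (by omega)
    have hflat : flatRuns (g :: ks) cnt = List.replicate (cnt g) g ++ flatRuns ks cnt := by
      simp [flatRuns]
    have hlen : (flatRuns (g :: ks) cnt).length = cnt g + (flatRuns ks cnt).length := by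
      rw [hflat]; simp
    have hN : (p + (flatRuns (g :: ks) cnt).length) / w - p / w
        = ((p + cnt g) / w - p / w)
          + ((p + cnt g + (flatRuns ks cnt).length) / w - (p + cnt g) / w) := by
      rw [hlen, show p + (cnt g + (flatRuns ks cnt).length) = p + cnt g + (flatRuns ks cnt).length from by omega]
      omega
    rw [hN, List.range_add, List.map_append, List.sum_append, List.map_map]
    -- first block: indices land in the replicate, every element is g
    have hfirst : (List.range ((p + cnt g) / w - p / w)).map
        (fun j => (flatRuns (g :: ks) cnt).getD ((p / w + 1 + j) * w - 1 - p) 0)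
        = List.replicate ((p + cnt g) / w - p / w) g := by
      rw [List.eq_replicate_iff]
      refine ⟨by simp, ?_⟩
      intro x hx
      rw [List.mem_map] at hx
      obtain ⟨j, hj, rfl⟩ := hx
      rw [List.mem_range] at hj
      obtain ⟨hlb, hub⟩ := window_bounds w p (cnt g) j hw hj
      rw [hflat, List.getD_eq_getElem _ _ (by simp; omega),
          List.getElem_append_left (by simp; omega)]
      exact List.getElem_replicate _
    rw [hfirst]
    -- second block: indices land in the tail, shifted by cnt g
    have hsecond : (List.range ((p + cnt g + (flatRuns ks cnt).length) / w - (p + cnt g) / w)).map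
        ((fun j => (flatRuns (g :: ks) cnt).getD ((p / w + 1 + j) * w - 1 - p) 0)
          ∘ (fun r => (p + cnt g) / w - p / w + r))
        = (List.range ((p + cnt g + (flatRuns ks cnt).length) / w - (p + cnt g) / w)).map
            (fun j => (flatRuns ks cnt).getD (((p + cnt g) / w + 1 + j) * w - 1 - (p + cnt g)) 0) := by
      apply List.map_congr_left
      intro r hr
      rw [List.mem_range] at hr
      simp only [Function.comp]
      have heq : p / w + 1 + ((p + cnt g) / w - p / w + r) = (p + cnt g) / w + 1 + r := by omega
      rw [heq]
      obtain ⟨hlb, hub⟩ := window_bounds w (p + cnt g) (flatRuns ks cnt).length r hw hr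
      rw [hflat, List.getD_eq_getElem _ _ (by simp; omega),
          List.getElem_append_right (by simp; omega),
          List.getD_eq_getElem _ _ (by omega)]
      congr 1
      simp only [List.length_replicate]
      omega
    rw [hsecond]
    rw [List.sum_replicate, nsmul_eq_mul]
    have hq1cast : ((((p + cnt g) / w - p / w) : Nat) : Int) = ((p + cnt g) / w : Nat) - ((p / w : Nat) : Int) := by
      push_cast [Nat.cast_sub hab]; ring
    rw [hq1cast]
    ring

theorem count_flat (ks : List Int) (cnt : Int → Nat) (hnd : ks.Nodup) (v : Int) :
    (flatRuns ks cnt).count v = if v ∈ ks then cnt v else 0 := by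
  induction ks with
  | nil => simp [flatRuns]
  | cons g ks ih =>
    rw [List.nodup_cons] at hnd
    have ih' := ih hnd.2
    simp only [flatRuns, List.flatMap_cons, List.count_append] at *
    rw [List.count_replicate, ih']
    by_cases hv : v = g
    · subst hv
      simp [hnd.1]
    · simp [hv, Ne.symm hv, List.mem_cons]

theorem flat_pairwise (ks : List Int) (cnt : Int → Nat)
    (h : ks.Pairwise (fun a b => b < a)) :
    (flatRuns ks cnt).Pairwise (fun a b => b ≤ a) := by
  induction ks with
  | nil => simp [flatRuns]
  | cons g ks ih =>
    rw [List.pairwise_cons] at h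
    simp only [flatRuns, List.flatMap_cons]
    rw [List.pairwise_append]
    refine ⟨?_, ih h.2, ?_⟩
    · exact List.pairwise_replicate.2 (Or.inr le_rfl)
    · intro x hx y hy
      rw [List.eq_of_mem_replicate hx]
      rw [List.mem_flatMap] at hy
      obtain ⟨g', hg', hy⟩ := hy
      rw [List.eq_of_mem_replicate hy]
      exact (h.1 g' hg').le

theorem flat_eq_sorted (score : List Int) :
    flatRuns (PySem.List.sorted (PySem.Set.ofList score) (fun x => x) true) (fun g => List.count g score)
      = PySem.List.sorted score (fun x => x) true := by
  set ks := PySem.List.sorted (PySem.Set.ofList score) (fun x => x) true with hks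
  have hperm : ks.Perm (PySem.Set.ofList score) := PySem.List.sorted_perm _ _ _
  have hnd : ks.Nodup := hperm.nodup_iff.2 (PySem.Set.nodup_ofList score)
  have hmem : ∀ v, v ∈ ks ↔ v ∈ score := by
    intro v
    rw [hperm.mem_iff, PySem.Set.mem_ofList]
  have hdesc : ks.Pairwise (fun a b => b < a) :=
    ((PySem.List.sorted_pairwise_rev (PySem.Set.ofList score) (fun x => x)).and hnd).imp
      (fun h => lt_of_le_of_ne h.1 (Ne.symm h.2))
  have hpermflat : (flatRuns ks (fun g => List.count g score)).Perm score := by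
    rw [List.perm_iff_count]
    intro v
    rw [count_flat ks _ hnd v]
    by_cases hv : v ∈ score
    · simp [(hmem v).2 hv]
    · rw [if_neg (fun h => hv ((hmem v).1 h))]
      exact (List.count_eq_zero.2 hv).symm
  refine List.Perm.eq_of_pairwise (le := fun a b => b ≤ a)
    (fun a b _ _ h1 h2 => le_antisymm h2 h1)
    (flat_pairwise ks _ hdesc)
    (PySem.List.sorted_pairwise_rev score (fun x => x))
    (hpermflat.trans (PySem.List.sorted_perm score (fun x => x) true).symm)

theorem B_char (k : Int) (score : List Int) (w : Nat) (hw : 1 ≤ w) :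
    solution_alt k (w : Int) score
      = sumMins (PySem.List.sorted score (fun x => x) true) w (score.length / w) * w := by
  unfold solution_alt
  rw [if_neg (by exact_mod_cast Nat.not_lt.2 hw)]
  dsimp only
  simp only [PySem.Dict.getD_counter, PySem.Dict.keys_counter]
  have hb := blockSum w hw (fun g => List.count g score)
        (PySem.List.sorted (PySem.Set.ofList score) (fun x => x) true) 0 0
  simp only [Nat.cast_zero] at hb
  rw [hb]
  rw [flat_eq_sorted score]
  have hlen : (PySem.List.sorted score (fun x => x) true).length = score.length :=
    (PySem.List.sorted_perm score (fun x => x) true).length_eq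
  rw [hlen]
  rw [zero_add, sumMins]
  congr 1
  simp only [Nat.zero_add, Nat.zero_div, Nat.sub_zero]
  exact congrArg List.sum (List.map_congr_left (fun j hj => by
    congr 1
    have h5 : (1 + j) * w = w + j * w := by ring
    omega))

theorem neg_case (k m : Int) (score : List Int) (hm : m < 0) :
    solution k m score = solution_alt k m score := by
  unfold solution solution_alt
  rw [if_pos (by omega)]
  have hempty : PySem.List.pyRange 0 (PySem.List.len score) m = [] := by
    unfold PySem.List.pyRange
    rw [if_neg (by omega)]
    simp only [PySem.List.len_eq]
    rw [if_neg (by omega), if_neg (by omega)]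
    simp
  rw [hempty]
  simp

-- ===== VERDICT (by name: the statement is the Claim_ definition above) =====
theorem solution_spec : Claim_equal_solution := by
  intro k m score _ hpre
  unfold Spec_solution
  rcases lt_trichotomy m 0 with hm | hm | hm
  · exact neg_case k m score hm
  · exact absurd hm hpre
  · obtain ⟨w, rfl⟩ : ∃ w : Nat, m = (w : Int) := ⟨m.toNat, (Int.toNat_of_nonneg hm.le).symm⟩
    have hw : 1 ≤ w := by exact_mod_cast hm
    rw [A_char k score w hw, B_char k score w hw]
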